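/- GENERATED by c/gen_code.py from gif.elf, the PROGRAM only (the base is in the shared library): where each function is linked. -/
import X86.Derived.User.State
namespace Gif.Code
open X86

def addr_prog_main : Word := 0x105000
def addr_DGifGetPrefixChar : Word := 0x105160
def addr_digest_byte : Word := 0x105240
def addr_digest_int : Word := 0x1052e0
def addr_digest_bytes : Word := 0x1053a0
def addr_digest_map : Word := 0x105480
def addr_digest_extensions : Word := 0x105660
def addr_digest_file : Word := 0x1057c0
def addr_mem_read : Word := 0x105c60
def addr_strncmp : Word := 0x105d80
def addr_fread : Word := 0x105e80
def addr_InternalRead : Word := 0x105f20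
def addr_DGifGetWord : Word := 0x106020
def addr_DGifSetupDecompress : Word := 0x106180
def addr_DGifBufferedInput : Word := 0x106540
def addr_DGifDecompressInput : Word := 0x1067a0
def addr_DGifDecompressLine : Word := 0x106ae0
def addr_fclose : Word := 0x1076c0
def addr_openbsd_reallocarray : Word := 0x107760
def addr_GifBitSize : Word := 0x107860
def addr_GifMakeMapObject : Word := 0x107900
def addr_GifFreeMapObject : Word := 0x107a80
def addr_GifAddExtensionBlock : Word := 0x107b40
def addr_GifFreeExtensions : Word := 0x107da0
def addr_GifFreeSavedImages : Word := 0x107ee0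
def addr_DGifGetScreenDesc : Word := 0x108080
def addr_DGifOpen : Word := 0x108680
def addr_DGifGetRecordType : Word := 0x108b80
def addr_DGifGetImageHeader : Word := 0x108e00
def addr_DGifGetImageDesc : Word := 0x109460
def addr_DGifGetExtensionNext : Word := 0x109820
def addr_DGifGetExtension : Word := 0x109a80
def addr_DGifCloseFile : Word := 0x109c60
def addr_DGifGetCodeNext : Word := 0x109f40
def addr_DGifGetLine : Word := 0x10a1e0
def addr_DGifDecreaseImageCounter : Word := 0x10a460
def addr_DGifSlurp : Word := 0x10a680
def addr_gif_decode : Word := 0x10ad80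
def addr__sub_I_65535_1 : Word := 0x10b300

/-- Every function: name, address, size in bytes. -/
def functions : List (String × Word × Nat) :=
  [ ("prog_main", 0x105000, 164)
  , ("DGifGetPrefixChar", 0x105160, 85)
  , ("digest_byte", 0x105240, 22)
  , ("digest_int", 0x1052e0, 49)
  , ("digest_bytes", 0x1053a0, 73)
  , ("digest_map", 0x105480, 228)
  , ("digest_extensions", 0x105660, 162)
  , ("digest_file", 0x1057c0, 590)
  , ("mem_read", 0x105c60, 131)
  , ("strncmp", 0x105d80, 120)
  , ("fread", 0x105e80, 2)
  , ("InternalRead", 0x105f20, 111)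
  , ("DGifGetWord", 0x106020, 162)
  , ("DGifSetupDecompress", 0x106180, 468)
  , ("DGifBufferedInput", 0x106540, 294)
  , ("DGifDecompressInput", 0x1067a0, 413)
  , ("DGifDecompressLine", 0x106ae0, 1505)
  , ("fclose", 0x1076c0, 2)
  , ("openbsd_reallocarray", 0x107760, 112)
  , ("GifBitSize", 0x107860, 29)
  , ("GifMakeMapObject", 0x107900, 190)
  , ("GifFreeMapObject", 0x107a80, 38)
  , ("GifAddExtensionBlock", 0x107b40, 298)
  , ("GifFreeExtensions", 0x107da0, 146)
  , ("GifFreeSavedImages", 0x107ee0, 198)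
  , ("DGifGetScreenDesc", 0x108080, 757)
  , ("DGifOpen", 0x108680, 634)
  , ("DGifGetRecordType", 0x108b80, 312)
  , ("DGifGetImageHeader", 0x108e00, 803)
  , ("DGifGetImageDesc", 0x109460, 472)
  , ("DGifGetExtensionNext", 0x109820, 295)
  , ("DGifGetExtension", 0x109a80, 231)
  , ("DGifCloseFile", 0x109c60, 360)
  , ("DGifGetCodeNext", 0x109f40, 326)
  , ("DGifGetLine", 0x10a1e0, 308)
  , ("DGifDecreaseImageCounter", 0x10a460, 271)
  , ("DGifSlurp", 0x10a680, 892)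
  , ("gif_decode", 0x10ad80, 698)
  , ("_sub_I_65535_1", 0x10b300, 24) ]

end Gif.Code
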